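-- pv_equiv track=rewrite | github.com/RyukoMatoiFan/lelouch | src/lelouch/llm_client.py | _detect_env_var
-- ===== SOURCE A (Python) =====
-- _PREFIX_TO_ENV_VAR = {
--     "openai/": "OPENAI_API_KEY",
--     "anthropic/": "ANTHROPIC_API_KEY",
--     "gemini/": "GEMINI_API_KEY",
--     "xai/": "XAI_API_KEY",
--     "openrouter/": "OPENROUTER_API_KEY",
--     "groq/": "GROQ_API_KEY",
--     "mistral/": "MISTRAL_API_KEY",
--     "deepseek/": "DEEPSEEK_API_KEY",
--     "cohere/": "COHERE_API_KEY",
--     "together_ai/": "TOGETHER_API_KEY",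
--     "zai/": "ZAI_API_KEY",
-- }
--
-- _NAME_TO_ENV_VAR = {
--     "gpt": "OPENAI_API_KEY",
--     "o1": "OPENAI_API_KEY",
--     "o3": "OPENAI_API_KEY",
--     "o4": "OPENAI_API_KEY",
--     "claude": "ANTHROPIC_API_KEY",
-- }
--
-- def _detect_env_var(model: str) -> str | None:
--     """Detect the correct env var for a model string."""
--     for prefix, env_var in _PREFIX_TO_ENV_VAR.items():
--         if model.startswith(prefix):
--             return env_var
--     for name_start, env_var in _NAME_TO_ENV_VAR.items():
--         if model.startswith(name_start):
--             return env_var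
--     return None
-- ===== SOURCE B (Python) =====
-- _PREFIX_TO_ENV_VAR = {
--     "openai/": "OPENAI_API_KEY",
--     "anthropic/": "ANTHROPIC_API_KEY",
--     "gemini/": "GEMINI_API_KEY",
--     "xai/": "XAI_API_KEY",
--     "openrouter/": "OPENROUTER_API_KEY",
--     "groq/": "GROQ_API_KEY",
--     "mistral/": "MISTRAL_API_KEY",
--     "deepseek/": "DEEPSEEK_API_KEY",
--     "cohere/": "COHERE_API_KEY",
--     "together_ai/": "TOGETHER_API_KEY",
--     "zai/": "ZAI_API_KEY",
-- }
--
-- def _detect_env_var(model: str) -> str | None: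
--     """Detect the correct env var for a model string."""
--     env = _PREFIX_TO_ENV_VAR.get(model[:model.find("/") + 1])
--     if env is not None:
--         return env
--     if model.startswith("gpt") or model[:2] in ("o1", "o3", "o4"):
--         return "OPENAI_API_KEY"
--     if model.startswith("claude"):
--         return "ANTHROPIC_API_KEY"
--     return None
-- ===== Notes on version B (the rewrite author's own statement) =====
-- stated objective: simpler
-- what changed: The first loop scanning all 11 slash-terminated prefixes with startswith becomes one direct dict lookup of the slice up to and including the first slash, and the second loop over the name table is eliminated entirely: the five name prefixes are folded into two hard-coded conditions (a 3-char startswith test or a 2-char slice compared against three candidates for the OpenAI key; a 6-char startswith test for the Anthropic key), dropping the name dict.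
import Mathlib
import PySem

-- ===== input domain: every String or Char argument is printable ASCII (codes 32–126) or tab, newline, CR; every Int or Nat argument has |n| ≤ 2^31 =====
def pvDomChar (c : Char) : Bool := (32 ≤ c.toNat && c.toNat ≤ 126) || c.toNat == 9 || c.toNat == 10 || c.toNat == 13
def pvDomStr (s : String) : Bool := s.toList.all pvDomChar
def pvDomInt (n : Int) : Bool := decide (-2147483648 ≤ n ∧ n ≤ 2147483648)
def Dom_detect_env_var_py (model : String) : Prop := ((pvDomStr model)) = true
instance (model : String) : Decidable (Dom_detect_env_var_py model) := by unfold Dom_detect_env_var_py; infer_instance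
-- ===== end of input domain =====

-- B replaces A's scan over the slash-terminated prefix table by one dict lookup of the first
-- slash-terminated segment, and replaces the name-table scan by two hard-coded tests (simpler).

-- ===== PORT A =====
def pyPrefixToEnvVar : PySem.Dict String String := PySem.Dict.mk
  [("openai/", "OPENAI_API_KEY"),
   ("anthropic/", "ANTHROPIC_API_KEY"),
   ("gemini/", "GEMINI_API_KEY"),
   ("xai/", "XAI_API_KEY"),
   ("openrouter/", "OPENROUTER_API_KEY"),
   ("groq/", "GROQ_API_KEY"),
   ("mistral/", "MISTRAL_API_KEY"),
   ("deepseek/", "DEEPSEEK_API_KEY"),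
   ("cohere/", "COHERE_API_KEY"),
   ("together_ai/", "TOGETHER_API_KEY"),
   ("zai/", "ZAI_API_KEY")]

def pyNameToEnvVar : PySem.Dict String String := PySem.Dict.mk
  [("gpt", "OPENAI_API_KEY"),
   ("o1", "OPENAI_API_KEY"),
   ("o3", "OPENAI_API_KEY"),
   ("o4", "OPENAI_API_KEY"),
   ("claude", "ANTHROPIC_API_KEY")]

def detect_env_var_py (model : String) : Option String :=
  match pyPrefixToEnvVar.items.find? (fun p => PySem.Str.startswith model p.1) with
  | some (_, env_var) => some env_var
  | none =>
    match pyNameToEnvVar.items.find? (fun p => PySem.Str.startswith model p.1) with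
    | some (_, env_var) => some env_var
    | none => none

-- ===== PORT B =====
def detect_env_var_py_alt (model : String) : Option String :=
  match pyPrefixToEnvVar.get? (PySem.Str.slice model none (some (PySem.Str.find model "/" + 1))) with
  | some env => some env
  | none =>
    if PySem.Str.startswith model "gpt"
        || (["o1", "o3", "o4"] : List String).contains (PySem.Str.slice model none (some 2)) then
      some "OPENAI_API_KEY"
    else if PySem.Str.startswith model "claude" then
      some "ANTHROPIC_API_KEY"
    else
      none

-- ===== PRECONDITION & SPEC =====
def Spec_detect_env_var_py (model : String) (out : Option String) : Prop := out = detect_env_var_py_alt model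
instance (model : String) (out : Option String) : Decidable (Spec_detect_env_var_py model out) := by unfold Spec_detect_env_var_py; infer_instance

-- ===== CLAIM (what is proved, stated in full; the proofs are below) =====
def Claim_equal_detect_env_var_py : Prop := ∀ (model : String), Dom_detect_env_var_py model → Spec_detect_env_var_py model (detect_env_var_py model)

-- ===== LEMMAS AND PROOFS =====

-- two slash-free words followed by '/' starting the same string are equal
theorem pv_prefix_slash_eq : ∀ (w t u : List Char), '/' ∉ w → '/' ∉ t →
    (w ++ ['/']) <+: (t ++ '/' :: u) → w = t := by
  intro w
  induction w with
  | nil =>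
    intro t u _ ht h
    cases t with
    | nil => rfl
    | cons c t' =>
      exfalso
      rcases h with ⟨s, hs⟩
      simp at hs
      exact ht (by simp [← hs.1])
  | cons a w' ih =>
    intro t u hw ht h
    cases t with
    | nil =>
      exfalso
      rcases h with ⟨s, hs⟩
      simp at hs
      exact hw (by simp [hs.1])
    | cons c t' =>
      rcases h with ⟨s, hs⟩
      simp at hs
      obtain ⟨hac, hrest⟩ := hs
      have : w' = t' := by
        apply ih t' u (fun hm => hw (List.mem_cons_of_mem _ hm))
          (fun hm => ht (List.mem_cons_of_mem _ hm))
        exact ⟨s, by simpa using hrest⟩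
      simp [hac, this]

theorem pv_cond_eq (w t u : List Char) (hw : '/' ∉ w) (ht : '/' ∉ t) :
    PySem.Chars.startswith (t ++ '/' :: u) (w ++ ['/']) = decide (w = t) := by
  by_cases h : w = t
  · subst h
    simp only [decide_true]
    rw [PySem.Chars.startswith_iff]
    exact ⟨u, by simp⟩
  · simp only [h, decide_false]
    rw [Bool.eq_false_iff]
    intro hc
    exact h (pv_prefix_slash_eq w t u hw ht ((PySem.Chars.startswith_iff _ _).mp hc))

-- A's prefix loop over pairs (each key a slash-free word + '/') equals dict lookup of t ++ "/"
theorem pv_loop_eq_lookup (t u : List Char) (key : String) (ht : '/' ∉ t)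
    (hkey : key.toList = t ++ ['/']) :
    ∀ pairs : List (String × String),
      (∀ p ∈ pairs, p.1.toList ≠ [] ∧ p.1.toList.getLast? = some '/' ∧ '/' ∉ p.1.toList.dropLast) →
      (List.find? (fun p => PySem.Chars.startswith (t ++ '/' :: u) p.1.toList) pairs).map
          (fun p => p.2)
        = (PySem.Dict.mk pairs).get? key := by
  intro pairs
  induction pairs with
  | nil => intro _; simp [PySem.Dict.get?]
  | cons p rest ih =>
    intro hshape
    obtain ⟨k, v⟩ := p
    obtain ⟨hne, hlast, hnos⟩ := hshape (k, v) (List.mem_cons_self)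
    have hksplit : k.toList = k.toList.dropLast ++ ['/'] := by
      have h1 : k.toList.dropLast ++ [k.toList.getLast hne] = k.toList :=
        List.dropLast_concat_getLast hne
      have h2 : k.toList.getLast hne = '/' := by
        have := List.getLast?_eq_some_getLast (l := k.toList) hne
        rw [this] at hlast
        exact Option.some.inj hlast
      rw [h2] at h1
      exact h1.symm
    rw [List.find?_cons, PySem.Dict.get?_mk_cons]
    by_cases hz : k.toList.dropLast = t
    · have hstart : PySem.Chars.startswith (t ++ '/' :: u) k.toList = true := by
        rw [hksplit, pv_cond_eq _ _ _ hnos ht]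
        simp [hz]
      have hbeq : (k == key) = true := by
        have : k = key := String.toList_inj.mp (by rw [hksplit, hz, hkey])
        simp [this]
      simp [hstart, hbeq]
    · have hstart : PySem.Chars.startswith (t ++ '/' :: u) k.toList = false := by
        rw [hksplit, pv_cond_eq _ _ _ hnos ht]
        simp [hz]
      have hbeq : (k == key) = false := by
        rw [Bool.eq_false_iff]
        intro hb
        have : k = key := by simpa using hb
        apply hz
        have : k.toList = t ++ ['/'] := by rw [this, hkey]
        have h2 : k.toList.dropLast ++ ['/'] = t ++ ['/'] := by rw [← hksplit, this]
        exact List.append_inj_left' h2 rfl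
      simp only [hstart, hbeq, Bool.false_eq_true, if_false]
      exact ih (fun q hq => hshape q (List.mem_cons_of_mem _ hq))

theorem pv_find?_congr {α : Type} (p q : α → Bool) (l : List α)
    (h : ∀ x ∈ l, p x = q x) : l.find? p = l.find? q := by
  induction l with
  | nil => rfl
  | cons a l ih =>
    rw [List.find?_cons, List.find?_cons, h a List.mem_cons_self,
      ih (fun x hx => h x (List.mem_cons_of_mem _ hx))]

-- A's prefix loop equals B's slice-and-lookup
theorem pv_first_eq (model : String) :
    (pyPrefixToEnvVar.items.find? (fun p => PySem.Str.startswith model p.1)).map (fun p => p.2)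
      = pyPrefixToEnvVar.get? (PySem.Str.slice model none (some (PySem.Str.find model "/" + 1))) := by
  by_cases hf : PySem.Str.find model "/" = -1
  · have hkey : PySem.Str.slice model none (some (PySem.Str.find model "/" + 1)) = "" := by
      apply String.toList_inj.mp
      rw [hf]
      show PySem.List.slice model.toList none (some (-1 + 1)) = ([] : List Char)
      rw [PySem.List.slice_to _ (by omega)]
      simp
    rw [hkey]
    have hnone : pyPrefixToEnvVar.get? "" = none := by decide
    rw [hnone, Option.map_eq_none_iff, List.find?_eq_none]
    intro p hp
    have hnos : '/' ∉ model.toList := by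
      have := (PySem.Str.find_eq_neg_one_iff model "/").mp hf
      intro hm
      apply this
      obtain ⟨pre, suf, hps⟩ := List.append_of_mem hm
      exact ⟨pre, suf, by simpa using hps.symm⟩
    have hslash : '/' ∈ p.1.toList := by
      have : ∀ q ∈ pyPrefixToEnvVar.items, '/' ∈ q.1.toList := by decide
      exact this p hp
    rw [Bool.not_eq_true, PySem.Str.startswith_eq, Bool.eq_false_iff]
    intro hc
    exact hnos (((PySem.Chars.startswith_iff _ _).mp hc).sublist.mem hslash)
  · -- decompose the string at the first slash
    have h1 : PySem.Str.find model "/" = PySem.Chars.find model.toList ['/'] := by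
      rw [PySem.Str.find_eq]; rfl
    have hnn : 0 ≤ PySem.Chars.find model.toList ['/'] := by
      have h2 := PySem.Chars.neg_one_le_find (s := model.toList) (sub := ['/'])
      rw [h1] at hf
      omega
    set n : ℕ := (PySem.Chars.find model.toList ['/']).toNat with hn
    obtain ⟨hpre, hmin⟩ := PySem.Chars.find_spec hnn
    obtain ⟨u, hu⟩ := hpre
    have hdrop : model.toList.drop n = '/' :: u := by rw [← hu]; rfl
    have hnlt : n < model.toList.length := by
      by_contra hge
      rw [not_lt] at hge
      rw [List.drop_eq_nil_of_le hge] at hdrop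
      simp at hdrop
    have hsplit : model.toList = model.toList.take n ++ '/' :: u := by
      conv_lhs => rw [← List.take_append_drop n model.toList]
      rw [hdrop]
    have hts : '/' ∉ model.toList.take n := by
      intro hm
      obtain ⟨j, hj, hjv⟩ := List.getElem_of_mem hm
      have hjn : j < n := lt_of_lt_of_le hj (by simp)
      apply hmin j hjn
      have hjlen : j < model.toList.length := lt_trans hjn hnlt
      rw [List.getElem_take] at hjv
      refine ⟨model.toList.drop (j + 1), ?_⟩
      rw [← hjv]
      simpa using (List.getElem_cons_drop hjlen).symm
    have hfind : PySem.Str.find model "/" = (n : ℤ) := by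
      rw [PySem.Str.find_eq]
      show PySem.Chars.find model.toList ['/'] = (n : ℤ)
      omega
    have hkey : (PySem.Str.slice model none (some (PySem.Str.find model "/" + 1))).toList
        = model.toList.take n ++ ['/'] := by
      rw [hfind]
      have h1 : (PySem.Str.slice model none (some ((n : ℤ) + 1))).toList
          = PySem.Chars.slice model.toList none (some ((n : ℤ) + 1)) := by
        simp [PySem.Str.slice]
      rw [h1]
      have h2 : PySem.Chars.slice model.toList none (some ((n : ℤ) + 1))
          = model.toList.take ((n : ℤ) + 1).toNat := by
        show PySem.List.slice model.toList none (some ((n : ℤ) + 1))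
            = model.toList.take ((n : ℤ) + 1).toNat
        exact PySem.List.slice_to _ (by omega)
      rw [h2]
      have h3 : ((n : ℤ) + 1).toNat = n + 1 := by omega
      rw [h3]
      have hlen : (model.toList.take n).length = n := by
        rw [List.length_take, Nat.min_eq_left (le_of_lt hnlt)]
      conv_lhs => rw [hsplit, show n + 1 = (model.toList.take n).length + 1 from by rw [hlen]]
      rw [List.take_append]
      simp
    have hshape : ∀ p ∈ pyPrefixToEnvVar.items,
        p.1.toList ≠ [] ∧ p.1.toList.getLast? = some '/' ∧ '/' ∉ p.1.toList.dropLast := by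
      decide
    have hloop := pv_loop_eq_lookup (model.toList.take n) u
      (PySem.Str.slice model none (some (PySem.Str.find model "/" + 1))) hts hkey
      pyPrefixToEnvVar.items hshape
    have hitems : PySem.Dict.mk pyPrefixToEnvVar.items = pyPrefixToEnvVar := rfl
    rw [hitems] at hloop
    rw [← hloop]
    congr 1
    apply pv_find?_congr
    intro p _
    rw [PySem.Str.startswith_eq]
    conv_lhs => rw [hsplit]

-- a 2-char prefix test equals comparing the 2-char slice
theorem pv_sw2_eq_slice (model : String) (p : String) (hp : p.toList.length = 2) :
    PySem.Str.startswith model p = (PySem.Str.slice model none (some 2) == p) := by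
  rw [PySem.Str.startswith_eq]
  have hsl : (PySem.Str.slice model none (some 2)).toList = model.toList.take 2 := by
    have h1 : (PySem.Str.slice model none (some 2)).toList
        = PySem.Chars.slice model.toList none (some 2) := by simp [PySem.Str.slice]
    rw [h1]
    show PySem.List.slice model.toList none (some (2 : ℤ)) = model.toList.take 2
    rw [PySem.List.slice_to _ (by omega)]
    rfl
  by_cases h : p.toList <+: model.toList
  · have : model.toList.take 2 = p.toList := by
      rw [← hp]; exact (List.prefix_iff_eq_take.mp h).symm
    have hb : (PySem.Str.slice model none (some 2) == p) = true := by
      simp only [beq_iff_eq]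
      exact String.toList_inj.mp (by rw [hsl, this])
    rw [hb, (PySem.Chars.startswith_iff _ _).mpr h]
  · have hb : (PySem.Str.slice model none (some 2) == p) = false := by
      simp only [beq_eq_false_iff_ne, ne_eq]
      intro he
      apply h
      rw [← he, hsl]
      exact List.take_prefix _ _
    rw [hb, Bool.eq_false_iff]
    intro hc
    exact h ((PySem.Chars.startswith_iff _ _).mp hc)

-- A's name-table scan equals B's hard-coded tests
theorem pv_second_eq (model : String) :
    (match pyNameToEnvVar.items.find? (fun p => PySem.Str.startswith model p.1) with
     | some (_, env_var) => some env_var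
     | none => none)
      = (if PySem.Str.startswith model "gpt"
            || (["o1", "o3", "o4"] : List String).contains (PySem.Str.slice model none (some 2)) then
          some "OPENAI_API_KEY"
        else if PySem.Str.startswith model "claude" then
          some "ANTHROPIC_API_KEY"
        else
          none) := by
  have hitems : pyNameToEnvVar.items =
      [("gpt", "OPENAI_API_KEY"), ("o1", "OPENAI_API_KEY"), ("o3", "OPENAI_API_KEY"),
       ("o4", "OPENAI_API_KEY"), ("claude", "ANTHROPIC_API_KEY")] := rfl
  have hc : (["o1", "o3", "o4"] : List String).contains (PySem.Str.slice model none (some 2))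
      = (PySem.Str.startswith model "o1" || PySem.Str.startswith model "o3"
          || PySem.Str.startswith model "o4") := by
    rw [pv_sw2_eq_slice model "o1" (by decide), pv_sw2_eq_slice model "o3" (by decide),
      pv_sw2_eq_slice model "o4" (by decide)]
    simp only [List.contains_cons, List.contains_nil, Bool.or_false]
    simp [Bool.or_assoc]
  rw [hitems, hc]
  simp only [PySem.Str.startswith_eq]
  by_cases h1 : PySem.Chars.startswith model.toList ['g', 'p', 't'] <;>
    by_cases h2 : PySem.Chars.startswith model.toList ['o', '1'] <;>
    by_cases h3 : PySem.Chars.startswith model.toList ['o', '3'] <;>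
    by_cases h4 : PySem.Chars.startswith model.toList ['o', '4'] <;>
    by_cases h5 : PySem.Chars.startswith model.toList ['c', 'l', 'a', 'u', 'd', 'e'] <;>
    simp [List.find?_cons, h1, h2, h3, h4, h5]

-- ===== VERDICT (by name: the statement is the Claim_ definition above) =====
theorem detect_env_var_py_spec : Claim_equal_detect_env_var_py := by
  intro model _
  unfold Spec_detect_env_var_py
  have h := pv_first_eq model
  rw [detect_env_var_py, detect_env_var_py_alt, ← h, ← pv_second_eq model]
  rcases hF : pyPrefixToEnvVar.items.find? (fun p => PySem.Str.startswith model p.1) with _ | ⟨k, env⟩ <;>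
    rw [hF] <;> simp
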